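-- pv_equiv track=rewrite | github.com/pypi-data/pypi-mirror-403 | packages/abstract-utilities/abstract_utilities-0.2.2.705-py3-none-any.whl/abstract_utilities/parse_utils.py | get_code_blocks
-- ===== SOURCE A (Python) =====
-- def get_blocks(data, delim='\n'):
--     if isinstance(data, list):
--         return data, None
--     if isinstance(data, tuple):
--         data, delim = data[0], data[-1]
--     return data.split(delim), delim
--
-- def get_code_blocks(data, indent_level=0):
--     blocks = [[]]
--     lines, delim = get_blocks(data, '\n')
--     for line in lines:
--         beginning = ''
--         for char in line:
--             if char in ['', ' ', '\n', '\t']: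
--                 beginning += char
--             else:
--                 break
--         if len(beginning) == indent_level:
--             blocks[-1] = delim.join(blocks[-1])
--             blocks.append([line])
--         else:
--             blocks[-1].append(line)
--     blocks[-1] = delim.join(blocks[-1])
--     return blocks, delim
-- ===== SOURCE B (Python) =====
-- def get_blocks(data, delim='\n'):
--     if isinstance(data, list):
--         return data, None
--     if isinstance(data, tuple):
--         data, delim = data[0], data[-1]
--     return data.split(delim), delim
--
-- def get_code_blocks(data, indent_level=0):
--     lines, delim = get_blocks(data, '\n')
--     bounds = [i for i, line in enumerate(lines)
--               if len(line) - len(line.lstrip(' \t\n')) == indent_level]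
--     cuts = [0] + bounds + [len(lines)]
--     blocks = [delim.join(lines[a:b]) for a, b in zip(cuts, cuts[1:])]
--     return blocks, delim
-- ===== Notes on version B (the rewrite author's own statement) =====
-- stated objective: alternative
-- what changed: A builds the blocks in one pass with a mutable accumulator (append to the last block, flush and start a new one at each boundary line); B first computes the list of boundary-line indices (leading-whitespace length == indent_level) and then produces each block by slicing the line list between consecutive cut points and joining.
import Mathlib
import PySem

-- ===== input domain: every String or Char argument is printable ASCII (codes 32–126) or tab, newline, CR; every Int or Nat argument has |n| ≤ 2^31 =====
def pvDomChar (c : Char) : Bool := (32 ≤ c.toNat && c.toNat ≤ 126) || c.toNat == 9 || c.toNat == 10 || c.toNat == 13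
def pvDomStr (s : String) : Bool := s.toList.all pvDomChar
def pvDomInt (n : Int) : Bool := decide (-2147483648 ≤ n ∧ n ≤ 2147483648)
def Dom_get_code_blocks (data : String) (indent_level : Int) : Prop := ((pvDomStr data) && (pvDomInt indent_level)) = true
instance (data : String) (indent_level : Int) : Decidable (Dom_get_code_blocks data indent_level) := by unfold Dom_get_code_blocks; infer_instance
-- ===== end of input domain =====

-- B replaces A's one-pass accumulator (grow current block / flush on boundary) by a two-pass
-- boundary-index computation followed by slicing; objective: alternative decomposition, return value identical.

-- ===== PORT A =====
-- inner loop: beginning grows while char in ['', ' ', '\n', '\t'] ('' never equals a char), else break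
def pvBeginningA : List Char → List Char
  | [] => []
  | c :: cs => if c == ' ' || c == '\n' || c == '\t' then c :: pvBeginningA cs else []

-- blocks is heterogeneous in Python (finished entries already joined, last entry still a list);
-- modeled as (finished joined blocks, current list block); blocks[-1] = delim.join(blocks[-1]); blocks.append([line])
def get_code_blocks (data : String) (indent_level : Int) : List String × Option String :=
  let lines := (PySem.Str.split? data "\n").getD []   -- data.split('\n'); sep literal nonempty, so never none; delim = '\n'
  let st := lines.foldl (fun (st : List String × List String) line =>
      if ((pvBeginningA line.toList).length : Int) = indent_level then   -- len(beginning) == indent_level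
        (st.1 ++ [PySem.Str.join "\n" st.2], [line])
      else
        (st.1, st.2 ++ [line])) ([], [])
  (st.1 ++ [PySem.Str.join "\n" st.2], some "\n")

-- ===== PORT B =====
-- len(line) - len(line.lstrip(' \t\n')): lstrip(chars) drops exactly the leading run of those chars — exact
def pvLeadLenB (line : String) : Int :=
  (line.toList.length : Int) - ((line.toList.dropWhile (fun c => c == ' ' || c == '\t' || c == '\n')).length : Int)

def get_code_blocks_alt (data : String) (indent_level : Int) : List String × Option String :=
  let lines := (PySem.Str.split? data "\n").getD []   -- data.split('\n'); sep literal nonempty, so never none; delim = '\n'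
  let bounds := ((PySem.List.enumerate lines 0).filter (fun p => pvLeadLenB p.2 == indent_level)).map (·.1)
  let cuts := (0 : Int) :: (bounds ++ [(lines.length : Int)])
  let blocks := (cuts.zip cuts.tail).map
      (fun p => PySem.Str.join "\n" (PySem.List.slice lines (some p.1) (some p.2)))
  (blocks, some "\n")

-- ===== PRECONDITION & SPEC =====
def Spec_get_code_blocks (data : String) (indent_level : Int) (out : List String × Option String) : Prop := out = get_code_blocks_alt data indent_level
instance (data : String) (indent_level : Int) (out : List String × Option String) : Decidable (Spec_get_code_blocks data indent_level out) := by unfold Spec_get_code_blocks; infer_instance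

-- ===== CLAIM (what is proved, stated in full; the proofs are below) =====
def Claim_equal_get_code_blocks : Prop := ∀ (data : String) (indent_level : Int), Dom_get_code_blocks data indent_level → Spec_get_code_blocks data indent_level (get_code_blocks data indent_level)

-- ===== LEMMAS AND PROOFS =====

-- boundary test, shared spec-level form
def pvIsB (lvl : Int) (line : String) : Bool := pvLeadLenB line == lvl

-- canonical segmentation: first segment = lines before the first boundary, each further segment starts at a boundary
def pvSegF (lvl : Int) : List String → List String × List (List String)
  | [] => ([], [])
  | l :: ls =>
    let r := pvSegF lvl ls
    if pvIsB lvl l then ([], (l :: r.1) :: r.2) else (l :: r.1, r.2)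

-- boundary indices, Nat-valued, structural
def pvBnds (lvl : Int) : List String → List Nat
  | [] => []
  | l :: ls => (if pvIsB lvl l then [0] else []) ++ (pvBnds lvl ls).map (· + 1)

theorem pvLead_len (cs : List Char) :
    (cs.dropWhile (fun c => c == ' ' || c == '\t' || c == '\n')).length + (pvBeginningA cs).length = cs.length := by
  induction cs with
  | nil => simp [pvBeginningA]
  | cons c cs ih =>
    have hpred : (c == ' ' || c == '\t' || c == '\n') = (c == ' ' || c == '\n' || c == '\t') := by
      cases h1 : (c == ' ') <;> cases h2 : (c == '\t') <;> cases h3 : (c == '\n') <;> simp_all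
    by_cases h : (c == ' ' || c == '\n' || c == '\t') = true
    · simp [pvBeginningA, hpred, h]
      omega
    · simp [pvBeginningA, hpred, h]

theorem pvCondA_iff (lvl : Int) (line : String) :
    (((pvBeginningA line.toList).length : Int) = lvl) ↔ pvIsB lvl line = true := by
  have h1 := pvLead_len line.toList
  simp only [pvIsB, pvLeadLenB, beq_iff_eq]
  omega

-- A's loop computes the joined canonical segmentation, generalized over the running state
theorem pvA_loop (lvl : Int) (ls : List String) : ∀ fin cur : List String,
    (ls.foldl (fun (st : List String × List String) line =>
        if ((pvBeginningA line.toList).length : Int) = lvl then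
          (st.1 ++ [PySem.Str.join "\n" st.2], [line])
        else
          (st.1, st.2 ++ [line])) (fin, cur)).1
      ++ [PySem.Str.join "\n" ((ls.foldl (fun (st : List String × List String) line =>
        if ((pvBeginningA line.toList).length : Int) = lvl then
          (st.1 ++ [PySem.Str.join "\n" st.2], [line])
        else
          (st.1, st.2 ++ [line])) (fin, cur)).2)]
    = fin ++ ((cur ++ (pvSegF lvl ls).1) :: (pvSegF lvl ls).2).map (PySem.Str.join "\n") := by
  induction ls with
  | nil => intro fin cur; simp [pvSegF]
  | cons l ls ih =>
    intro fin cur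
    by_cases h : ((pvBeginningA l.toList).length : Int) = lvl
    · have hb : pvIsB lvl l = true := (pvCondA_iff lvl l).1 h
      simp only [List.foldl_cons, if_pos h]
      rw [ih]
      simp [pvSegF, hb]
    · have hb : pvIsB lvl l = false := by
        cases h' : pvIsB lvl l
        · rfl
        · exact absurd ((pvCondA_iff lvl l).2 h') h
      simp only [List.foldl_cons, if_neg h]
      rw [ih]
      simp [pvSegF, hb]

-- B's Int bounds are the cast of pvBnds (any start offset)
theorem pvBnds_cast (lvl : Int) (ls : List String) : ∀ s : Nat,
    ((PySem.List.enumerate ls (s : Int)).filter (fun p => pvLeadLenB p.2 == lvl)).map (·.1)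
    = (pvBnds lvl ls).map (fun k => ((k + s : Nat) : Int)) := by
  induction ls with
  | nil => intro s; simp [pvBnds, PySem.List.enumerate_nil]
  | cons l ls ih =>
    intro s
    rw [PySem.List.enumerate_cons]
    have hsh : ((s : Int) + 1) = ((s + 1 : Nat) : Int) := by push_cast; ring
    by_cases hb : pvIsB lvl l = true
    · have ht : (pvLeadLenB l == lvl) = true := hb
      simp only [List.filter_cons, ht, List.map_cons, hsh, ih (s + 1), pvBnds, hb, if_true,
        List.singleton_append, List.map_map]
      refine List.cons_eq_cons.mpr ⟨by push_cast; ring, ?_⟩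
      apply List.map_congr_left; intro k _
      simp only [Function.comp_def]; push_cast; ring
    · have ht : (pvLeadLenB l == lvl) = false := by simpa [pvIsB] using hb
      simp only [List.filter_cons, ht, hsh, ih (s + 1), pvBnds, hb, Bool.false_eq_true, if_false,
        List.nil_append, List.map_map]
      apply List.map_congr_left; intro k _
      simp only [Function.comp_def]; push_cast; ring

-- slicing along cut points all shifted by one = slicing the tail along the original cuts
theorem pvShiftZip (l : String) (ls : List String) (ys zs : List Nat) :
    ((ys.map (· + 1)).zip (zs.map (· + 1))).map
        (fun p : Nat × Nat => ((l :: ls).drop p.1).take (p.2 - p.1))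
    = (ys.zip zs).map (fun p : Nat × Nat => (ls.drop p.1).take (p.2 - p.1)) := by
  rw [List.zip_map, List.map_map]
  apply List.map_congr_left
  rintro ⟨a, b⟩ _
  simp [Nat.add_sub_add_right]

-- B's slicing along the computed cuts is the canonical segmentation
theorem pvB_main (lvl : Int) (ls : List String) :
    ((((0 : Nat) :: (pvBnds lvl ls ++ [ls.length])).zip (pvBnds lvl ls ++ [ls.length])).map
        (fun p : Nat × Nat => (ls.drop p.1).take (p.2 - p.1)))
    = (pvSegF lvl ls).1 :: (pvSegF lvl ls).2 := by
  induction ls with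
  | nil => simp [pvBnds, pvSegF]
  | cons l ls ih =>
    rcases hx : pvBnds lvl ls ++ [ls.length] with _ | ⟨x, xs⟩
    · exact absurd hx (by simp)
    have hmap : pvBnds lvl (l :: ls) ++ [(l :: ls).length]
        = (if pvIsB lvl l then [(0 : Nat)] else []) ++ (x :: xs).map (· + 1) := by
      simp [pvBnds, List.map_append, ← hx, List.append_assoc]
    rw [hx] at ih
    simp only [List.zip_cons_cons, List.map_cons, List.drop_zero, Nat.sub_zero] at ih
    obtain ⟨ih1, ih2⟩ := List.cons_eq_cons.mp ih
    have hz := pvShiftZip l ls (x :: xs) xs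
    simp only [List.map_cons] at hz
    by_cases hb : pvIsB lvl l = true
    · rw [hmap]
      simp only [hb, if_true, List.singleton_append, List.zip_cons_cons, List.map_cons,
        List.drop_zero, List.take_zero, Nat.sub_zero, List.take_succ_cons]
      rw [hz, ih2]
      simp only [pvSegF, hb, if_true]
      rw [← ih1]
    · rw [hmap]
      simp only [hb, Bool.false_eq_true, if_false, List.nil_append, List.zip_cons_cons,
        List.map_cons, List.drop_zero, Nat.sub_zero, List.take_succ_cons]
      rw [hz, ih2]
      simp only [pvSegF, hb, Bool.false_eq_true, if_false]
      rw [← ih1]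

-- proof-side names for the two reduced bodies
def pvFoldA (lvl : Int) (lines : List String) : List String × List String :=
  lines.foldl (fun (st : List String × List String) line =>
      if ((pvBeginningA line.toList).length : Int) = lvl then
        (st.1 ++ [PySem.Str.join "\n" st.2], [line])
      else
        (st.1, st.2 ++ [line])) ([], [])

def pvCutsB (lvl : Int) (lines : List String) : List Int :=
  (0 : Int) :: ((((PySem.List.enumerate lines 0).filter (fun p => pvLeadLenB p.2 == lvl)).map (·.1))
    ++ [(lines.length : Int)])

-- the two reduced bodies agree for every line list (A's fold vs B's cut-and-slice)
theorem pvMain (lvl : Int) (lines : List String) :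
    (((pvFoldA lvl lines).1 ++ [PySem.Str.join "\n" (pvFoldA lvl lines).2], some "\n")
      : List String × Option String)
    = ((((pvCutsB lvl lines).zip (pvCutsB lvl lines).tail).map
        (fun p => PySem.Str.join "\n" (PySem.List.slice lines (some p.1) (some p.2))), some "\n")) := by
  unfold pvFoldA pvCutsB
  rw [Prod.mk.injEq]
  refine ⟨?_, rfl⟩
  rw [pvA_loop lvl lines [] []]
  simp only [List.nil_append]
  have hb0 := pvBnds_cast lvl lines 0
  simp only [Nat.add_zero, Nat.cast_zero] at hb0
  rw [hb0]
  have hcast : ((0 : Int) :: ((pvBnds lvl lines).map (fun k : Nat => (k : Int)) ++ [(lines.length : Int)]))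
      = ((0 :: (pvBnds lvl lines ++ [lines.length])).map (fun k : Nat => (k : Int))) := by
    simp
  rw [hcast]
  have ht : (List.map (fun k : Nat => (k : Int)) (0 :: (pvBnds lvl lines ++ [lines.length]))).tail
      = List.map (fun k : Nat => (k : Int)) (pvBnds lvl lines ++ [lines.length]) := by
    simp
  rw [ht, List.zip_map, List.map_map]
  have hpt : ((fun p => PySem.Str.join "\n" (PySem.List.slice lines (some p.1) (some p.2))) ∘
        Prod.map (fun k : Nat => (k : Int)) (fun k : Nat => (k : Int)))
      = (PySem.Str.join "\n" ∘ fun p : Nat × Nat => (lines.drop p.1).take (p.2 - p.1)) := by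
    funext p
    simp [PySem.List.slice_natCast]
  rw [hpt, ← List.map_map, pvB_main]

-- ===== VERDICT (by name: the statement is the Claim_ definition above) =====
theorem get_code_blocks_spec : Claim_equal_get_code_blocks := by
  intro data lvl _
  show get_code_blocks data lvl = get_code_blocks_alt data lvl
  exact pvMain lvl ((PySem.Str.split? data "\n").getD [])
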